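-- pv_equiv track=rewrite | github.com/LunarCM/HGNNA | utils.py | get_node2edge_
-- ===== SOURCE A (Python) =====
-- def get_node2edge_(sessions):
--     node2edge_index = []
--     j = 0
--     for i, session in enumerate(sessions):
--         for item in session:
--             if item != 0:
--                 node2edge_index.append([j, i])
--                 j += 1
--     return node2edge_index
-- ===== SOURCE B (Python) =====
-- def get_node2edge_(sessions):
--     counts = [len(session) - session.count(0) for session in sessions]
--     offsets = []
--     start = 0
--     for c in counts:
--         offsets.append(start)
--         start += c
--     return [[o + k, i] for i, (o, c) in enumerate(zip(offsets, counts)) for k in range(c)]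
-- ===== Notes on version B (the rewrite author's own statement) =====
-- stated objective: alternative
-- what changed: Instead of scanning items with a running edge counter, B first computes per-session nonzero counts via list.count, turns them into prefix-sum offsets, and then materialises each session's rows as range(offset, offset+count) blocks - the per-item counter disappears.
import Mathlib
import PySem

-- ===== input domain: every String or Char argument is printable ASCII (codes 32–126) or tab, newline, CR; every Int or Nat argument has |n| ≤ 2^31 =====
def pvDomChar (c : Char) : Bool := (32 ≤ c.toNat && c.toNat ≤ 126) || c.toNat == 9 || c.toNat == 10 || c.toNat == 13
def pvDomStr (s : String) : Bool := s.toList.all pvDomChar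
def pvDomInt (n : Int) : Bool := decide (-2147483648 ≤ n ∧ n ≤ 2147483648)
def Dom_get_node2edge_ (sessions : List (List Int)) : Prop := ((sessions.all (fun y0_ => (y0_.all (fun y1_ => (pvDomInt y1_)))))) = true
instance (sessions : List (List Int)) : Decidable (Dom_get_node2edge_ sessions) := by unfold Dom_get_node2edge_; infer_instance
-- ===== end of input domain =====

-- B replaces A's item-by-item scan with a running edge counter by a count/prefix-sum
-- scheme: per-session nonzero counts, prefix offsets, then range-expansion into rows
-- (objective: alternative, same asymptotic cost).

-- ===== PORT A =====
-- body of A's inner loop: append [j, i] and bump j when the item is nonzero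
def pvStep (i : Int) (st : List (List Int) × Int) (item : Int) : List (List Int) × Int :=
  if item ≠ 0 then (st.1 ++ [[st.2, i]], st.2 + 1) else st

-- literal port of A: nested loop over enumerate(sessions), state (node2edge_index, j)
def get_node2edge_ (sessions : List (List Int)) : List (List Int) :=
  ((PySem.List.enumerate sessions).foldl
    (fun st p => p.2.foldl (pvStep p.1) st) ([], 0)).1

-- ===== PORT B =====
-- len(session) - session.count(0)
def pvCnt (s : List Int) : Int := (s.length : Int) - (PySem.List.count s 0 : Int)

-- literal port of B: counts, then the offsets loop with state (offsets, start),
-- then the comprehension over enumerate(zip(offsets, counts)) and range(c)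
def get_node2edge__alt (sessions : List (List Int)) : List (List Int) :=
  let counts : List Int := sessions.map pvCnt
  let offsets : List Int :=
    (counts.foldl (fun (st : List Int × Int) c => (st.1 ++ [st.2], st.2 + c)) ([], 0)).1
  (PySem.List.enumerate (offsets.zip counts)).flatMap
    (fun p => (PySem.List.pyRange 0 p.2.2 1).map (fun k => [p.2.1 + k, p.1]))

-- ===== PRECONDITION & SPEC =====
def Spec_get_node2edge_ (sessions : List (List Int)) (out : List (List Int)) : Prop := out = get_node2edge__alt sessions
instance (sessions : List (List Int)) (out : List (List Int)) : Decidable (Spec_get_node2edge_ sessions out) := by unfold Spec_get_node2edge_; infer_instance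

-- ===== CLAIM (what is proved, stated in full; the proofs are below) =====
def Claim_equal_get_node2edge_ : Prop := ∀ (sessions : List (List Int)), Dom_get_node2edge_ sessions → Spec_get_node2edge_ sessions (get_node2edge_ sessions)

-- ===== LEMMAS AND PROOFS =====

-- the session indices one session contributes, as A emits them
def pvEdges (p : Int × List Int) : List Int :=
  (p.2.filter (fun item => decide (item ≠ 0))).map (fun _ => p.1)

-- inner loop of A: appends one enumerated output row per nonzero item of the session
theorem pv_inner (i : Int) (session : List Int) (acc : List (List Int)) (n : Int) :
    session.foldl (pvStep i) (acc, n)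
    = (acc ++ (PySem.List.enumerate (pvEdges (i, session)) n).map (fun q => [q.1, q.2]),
       n + ((pvEdges (i, session)).length : Int)) := by
  induction session generalizing acc n with
  | nil => simp [pvEdges]
  | cons x xs ih =>
    by_cases h : x = 0
    · rw [List.foldl_cons, ih]
      refine Prod.ext ?_ ?_ <;> simp [pvEdges, pvStep, h]
    · rw [List.foldl_cons, show pvStep i (acc, n) x = (acc ++ [[n, i]], n + 1) by
        simp [pvStep, h], ih]
      have he : pvEdges (i, x :: xs) = i :: pvEdges (i, xs) := by simp [pvEdges, h]
      refine Prod.ext ?_ ?_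
      · simp [he, PySem.List.enumerate_cons]
      · simp [he]; push_cast; ring

-- outer loop of A over any enumerated list, from any accumulator and counter
theorem pv_outer (l : List (Int × List Int)) (acc : List (List Int)) (n : Int) :
    l.foldl (fun st p => p.2.foldl (pvStep p.1) st) (acc, n)
    = (acc ++ (PySem.List.enumerate (l.flatMap pvEdges) n).map (fun q => [q.1, q.2]),
       n + ((l.flatMap pvEdges).length : Int)) := by
  induction l generalizing acc n with
  | nil => simp
  | cons p l ih =>
    rw [List.foldl_cons, show p.2.foldl (pvStep p.1) (acc, n)
        = (acc ++ (PySem.List.enumerate (pvEdges (p.1, p.2)) n).map (fun q => [q.1, q.2]),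
           n + ((pvEdges (p.1, p.2)).length : Int)) from pv_inner p.1 p.2 acc n, ih]
    refine Prod.ext ?_ ?_
    · simp [PySem.List.enumerate_append, List.append_assoc]
    · simp; push_cast; ring

-- B's offsets, recursively
def pvOffs (n : Int) : List Int → List Int
  | [] => []
  | c :: cs => n :: pvOffs (n + c) cs

theorem pv_offs_foldl (cs : List Int) (acc : List Int) (n : Int) :
    cs.foldl (fun (st : List Int × Int) c => (st.1 ++ [st.2], st.2 + c)) (acc, n)
    = (acc ++ pvOffs n cs, n + cs.sum) := by
  induction cs generalizing acc n with
  | nil => simp [pvOffs]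
  | cons c cs ih => simp [pvOffs, ih]; ring

theorem pv_cnt_len (s : List Int) :
    pvCnt s = ((pvEdges (i, s)).length : Int) := by
  induction s with
  | nil => simp [pvCnt, pvEdges, PySem.List.count]
  | cons x xs ih =>
    by_cases h : x = 0 <;>
      simp [pvCnt, pvEdges, PySem.List.count_eq, h] at * <;> omega

theorem pv_edges_repl (i : Int) (s : List Int) :
    pvEdges (i, s) = List.replicate (pvEdges (i, s)).length i := by
  simp [pvEdges, List.map_const']

-- one block of B equals A's rows for one session
theorem pv_block (L : Nat) (m n : Int) :
    (PySem.List.pyRange 0 (L : Int) 1).map (fun k => [n + k, m])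
    = (PySem.List.enumerate (List.replicate L m) n).map (fun q => [q.1, q.2]) := by
  induction L generalizing n with
  | zero => simp
  | succ L ih =>
    rw [show ((L + 1 : Nat) : Int) = (L : Int) + 1 by push_cast; ring,
        PySem.List.pyRange_one_succ_right (by positivity)]
    rw [List.replicate_succ', PySem.List.enumerate_append]
    simp [← ih]

-- B's assembled comprehension equals A's enumerated edge list, for any starts
theorem pv_assemble (ss : List (List Int)) (m n : Int) :
    (PySem.List.enumerate ((pvOffs n (ss.map pvCnt)).zip (ss.map pvCnt)) m).flatMap
      (fun p => (PySem.List.pyRange 0 p.2.2 1).map (fun k => [p.2.1 + k, p.1]))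
    = (PySem.List.enumerate ((PySem.List.enumerate ss m).flatMap pvEdges) n).map
        (fun q => [q.1, q.2]) := by
  induction ss generalizing m n with
  | nil => simp [pvOffs]
  | cons s ss ih =>
    rw [show (s :: ss).map pvCnt = pvCnt s :: ss.map pvCnt from rfl]
    rw [show pvOffs n (pvCnt s :: ss.map pvCnt) = n :: pvOffs (n + pvCnt s) (ss.map pvCnt)
        from rfl]
    rw [List.zip_cons_cons, PySem.List.enumerate_cons, List.flatMap_cons,
        PySem.List.enumerate_cons, List.flatMap_cons, PySem.List.enumerate_append,
        List.map_append, ih]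
    have h1 : pvCnt s = ((pvEdges (m, s)).length : Int) := pv_cnt_len s
    congr 1
    · rw [h1, pv_block, ← pv_edges_repl]
    · rw [h1]

-- ===== VERDICT (by name: the statement is the Claim_ definition above) =====
theorem get_node2edge__spec : Claim_equal_get_node2edge_ := by
  intro sessions _
  unfold Spec_get_node2edge_ get_node2edge_ get_node2edge__alt
  rw [pv_outer]
  simp only [pv_offs_foldl, List.nil_append]
  rw [pv_assemble]
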